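-- pv_equiv track=rewrite | github.com/Fondamenti18/fondamenti-di-programmazione | students/1808759/homework04/program01.py | trova_v
-- ===== SOURCE A (Python) =====
-- def trova_v(d,diz,x):
--     if x not in d :
--         diz=diz
--     else:
--         diz[x]=d[x]
--
--         for z in diz[x]:
--             trova_v(d,diz,z)
--     return diz
-- ===== SOURCE B (Python) =====
-- def trova_v(d, diz, x):
--     stack = [x]
--     while stack:
--         n = stack.pop()
--         if n in d:
--             diz[n] = d[n]
--             stack.extend(reversed(d[n]))
--     return diz
-- ===== Notes on version B (the rewrite author's own statement) =====
-- stated objective: alternative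
-- what changed: Recursive DFS replaced by an iterative DFS with an explicit stack (pop a node, record its adjacency list, push its neighbours reversed), keeping A's exact insertion order and its lack of a visited set.
import Mathlib
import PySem

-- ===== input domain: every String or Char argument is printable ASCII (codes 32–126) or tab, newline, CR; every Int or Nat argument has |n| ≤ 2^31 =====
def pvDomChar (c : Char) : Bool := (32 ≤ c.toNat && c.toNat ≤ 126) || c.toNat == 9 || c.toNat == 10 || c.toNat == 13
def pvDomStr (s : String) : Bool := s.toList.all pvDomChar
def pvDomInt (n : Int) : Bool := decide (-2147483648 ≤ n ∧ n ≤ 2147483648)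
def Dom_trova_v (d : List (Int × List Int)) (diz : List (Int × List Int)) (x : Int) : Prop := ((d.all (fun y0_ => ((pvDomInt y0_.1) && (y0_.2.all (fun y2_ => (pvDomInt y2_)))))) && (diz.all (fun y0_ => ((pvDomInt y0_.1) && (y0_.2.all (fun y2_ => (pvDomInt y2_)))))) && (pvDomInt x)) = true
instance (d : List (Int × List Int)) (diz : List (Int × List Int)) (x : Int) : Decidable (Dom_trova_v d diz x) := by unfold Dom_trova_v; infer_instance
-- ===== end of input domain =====

-- B replaces A's recursive DFS by an iterative DFS with an explicit stack (same values,
-- same dict insertion order, still no visited set); both A and B mutate the passed-in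
-- diz in place in Python — the equivalence proved here is about the returned value.

-- Shared dict primitives on the association-list representation of a Python dict
-- (first-match lookup; assignment overwrites in place, new keys append).
def alGet? : List (Int × List Int) → Int → Option (List Int)
  | [], _ => none
  | (k, v) :: rest, x => if k = x then some v else alGet? rest x

def alSet : List (Int × List Int) → Int → List Int → List (Int × List Int)
  | [], x, v => [(x, v)]
  | (k, w) :: rest, x, v => if k = x then (x, v) :: rest else (k, w) :: alSet rest x v

-- ===== PORT A =====
-- A's recursion has no visited set, so it terminates exactly when no key lying on a
-- directed cycle is reachable from x; the fuel bounds the RECURSION DEPTH (≤ d.length + 1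
-- on any input in Pre_, proved below) and is a totality device only — it never runs out
-- on inputs satisfying Pre_trova_v.
def trova_v_go (d : List (Int × List Int)) : Nat → List (Int × List Int) → Int → List (Int × List Int)
  | 0, diz, _ => diz
  | fuel + 1, diz, x =>
    match alGet? d x with
    | none => diz                         -- 'if x not in d: diz = diz'
    | some l =>                           -- 'diz[x] = d[x]; for z in diz[x]: trova_v(d, diz, z)'
      l.foldl (fun acc z => trova_v_go d fuel acc z) (alSet diz x l)

def trova_v (d : List (Int × List Int)) (diz : List (Int × List Int)) (x : Int) : List (Int × List Int) :=
  trova_v_go d (d.length + 1) diz x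

-- ===== PORT B =====
-- Number of loop iterations B performs from node x (= number of DFS visits); used only
-- as B's fuel, which therefore never runs out on inputs satisfying Pre_trova_v.
def trova_v_steps (d : List (Int × List Int)) : Nat → Int → Nat
  | 0, _ => 1
  | fuel + 1, x =>
    match alGet? d x with
    | none => 1
    | some l => 1 + (l.map (fun z => trova_v_steps d fuel z)).sum

-- The stack is a List Int with its HEAD as top: Python's 'stack.pop()' pops the head, and
-- 'stack.extend(reversed(d[n]))' (push reversed, pop from the end) makes d[n]'s elements
-- come off in list order, i.e. the new stack is l ++ rest. Exact for B's loop.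
def trova_v_loop (d : List (Int × List Int)) : Nat → List (Int × List Int) → List Int → List (Int × List Int)
  | _, diz, [] => diz
  | 0, diz, _ :: _ => diz
  | fuel + 1, diz, n :: rest =>
    match alGet? d n with
    | none => trova_v_loop d fuel diz rest
    | some l => trova_v_loop d fuel (alSet diz n l) (l ++ rest)

def trova_v_alt (d : List (Int × List Int)) (diz : List (Int × List Int)) (x : Int) : List (Int × List Int) :=
  trova_v_loop d (trova_v_steps d (d.length + 1) x) diz [x]

-- ===== PRECONDITION & SPEC =====
-- Graph vocabulary for the precondition: neighbours of a node, and the set of nodes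
-- reachable from a start set, computed as a standard transitive-reachClos saturation
-- (add the neighbours of every member until the set is stable; the fuel is a bound on
-- the number of saturation rounds, enough to reach the fixed point — proved below).
def nbrs (d : List (Int × List Int)) (x : Int) : List Int := (List.lookup x d).getD []

def addAll (S : List Int) (l : List Int) : List Int :=
  l.foldl (fun acc b => if b ∈ acc then acc else acc ++ [b]) S

def closeStep (d : List (Int × List Int)) (S : List Int) : List Int :=
  S.foldl (fun acc a => addAll acc (nbrs d a)) S

def reachClos (d : List (Int × List Int)) (S : List Int) : Nat → List Int
  | 0 => S
  | n + 1 => reachClos d (closeStep d S) n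

-- nodes reachable from x (including x itself)
def reachSet (d : List (Int × List Int)) (x : Int) : List Int :=
  reachClos d [x] ((d.flatMap (fun p => p.2)).length + 1)

-- nodes reachable from x in at least one step
def reachPlus (d : List (Int × List Int)) (x : Int) : List Int :=
  reachClos d (addAll [] (nbrs d x)) ((d.flatMap (fun p => p.2)).length + 1)

-- Pre_ excludes EXACTLY the inputs on which A raises RecursionError: those where some
-- node on a directed cycle is reachable from x (B's stack loop also never terminates
-- there); on every other input A returns normally and B returns the same dict.
def Pre_trova_v (d : List (Int × List Int)) (diz : List (Int × List Int)) (x : Int) : Prop :=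
  ∀ k ∈ reachSet d x, k ∉ reachPlus d k

instance (d : List (Int × List Int)) (diz : List (Int × List Int)) (x : Int) : Decidable (Pre_trova_v d diz x) := by
  unfold Pre_trova_v; infer_instance

def pvWitness_trova_v : (List (Int × List Int)) × (List (Int × List Int)) × Int :=
  ([(2, [3]), (1, [2, 3]), (3, [])], [(7, [0])], 1)

def Spec_trova_v (d : List (Int × List Int)) (diz : List (Int × List Int)) (x : Int) (out : List (Int × List Int)) : Prop := out = trova_v_alt d diz x
instance (d : List (Int × List Int)) (diz : List (Int × List Int)) (x : Int) (out : List (Int × List Int)) : Decidable (Spec_trova_v d diz x out) := by unfold Spec_trova_v; infer_instance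

-- ===== CLAIM (what is proved, stated in full; the proofs are below) =====
def Claim_equal_trova_v : Prop := ∀ (d : List (Int × List Int)) (diz : List (Int × List Int)) (x : Int), Dom_trova_v d diz x → Pre_trova_v d diz x → Spec_trova_v d diz x (trova_v d diz x)

-- ===== LEMMAS AND PROOFS =====

-- Prop-level reachability, used only by the proofs.
def Edge (d : List (Int × List Int)) (a b : Int) : Prop := b ∈ nbrs d a
def Reach (d : List (Int × List Int)) : Int → Int → Prop := Relation.ReflTransGen (Edge d)
def Closed (d : List (Int × List Int)) (T : List Int) : Prop := ∀ a ∈ T, nbrs d a ⊆ T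

lemma lookup_eq_alGet : ∀ (d : List (Int × List Int)) (x : Int), List.lookup x d = alGet? d x := by
  intro d x
  induction d with
  | nil => rfl
  | cons p rest ih =>
    obtain ⟨k, v⟩ := p
    by_cases hk : k = x
    · simp [List.lookup, alGet?, hk]
    · rw [List.lookup_cons]
      simp only [alGet?, hk, if_neg, not_false_iff]
      rw [show (x == k) = false from beq_eq_false_iff_ne.mpr (Ne.symm hk)]
      exact ih

lemma addAll_prefix : ∀ (l S : List Int), S <+: addAll S l := by
  intro l
  induction l with
  | nil => intro S; exact List.prefix_rfl
  | cons b l ih =>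
    intro S
    simp only [addAll, List.foldl_cons]
    by_cases hb : b ∈ S
    · simp only [hb, if_pos]; exact ih S
    · simp only [hb, if_neg, not_false_iff]
      exact (List.prefix_append S [b]).trans (ih (S ++ [b]))

lemma foldl_addAll_prefix (f : Int → List Int) :
    ∀ (l : List Int) (acc : List Int), acc <+: l.foldl (fun acc a => addAll acc (f a)) acc := by
  intro l
  induction l with
  | nil => intro acc; exact List.prefix_rfl
  | cons a l ih =>
    intro acc
    simp only [List.foldl_cons]
    exact (addAll_prefix (f a) acc).trans (ih (addAll acc (f a)))

lemma closeStep_prefix (d : List (Int × List Int)) (S : List Int) : S <+: closeStep d S :=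
  foldl_addAll_prefix (nbrs d) S S

lemma subset_addAll : ∀ (l S : List Int), l ⊆ addAll S l := by
  intro l
  induction l with
  | nil => intro S; simp
  | cons b l ih =>
    intro S c hc
    simp only [addAll, List.foldl_cons]
    rcases List.mem_cons.mp hc with rfl | hcl
    · by_cases hb : c ∈ S
      · simp only [hb, if_pos]
        exact (addAll_prefix l S).subset hb
      · simp only [hb, if_neg, not_false_iff]
        exact (addAll_prefix l (S ++ [c])).subset (by simp)
    · exact ih _ hcl

lemma mem_addAll_cases : ∀ (l S : List Int) (a : Int), a ∈ addAll S l → a ∈ S ∨ a ∈ l := by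
  intro l
  induction l with
  | nil => intro S a h; exact Or.inl h
  | cons b l ih =>
    intro S a h
    simp only [addAll, List.foldl_cons] at h
    by_cases hb : b ∈ S
    · simp only [hb, if_pos] at h
      rcases ih S a h with h' | h'
      · exact Or.inl h'
      · exact Or.inr (List.mem_cons_of_mem _ h')
    · simp only [hb, if_neg, not_false_iff] at h
      rcases ih (S ++ [b]) a h with h' | h'
      · rcases List.mem_append.mp h' with h'' | h''
        · exact Or.inl h''
        · simp at h''; subst h''; exact Or.inr (List.mem_cons_self ..)
      · exact Or.inr (List.mem_cons_of_mem _ h')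

lemma nodup_addAll : ∀ (l S : List Int), S.Nodup → (addAll S l).Nodup := by
  intro l
  induction l with
  | nil => intro S h; exact h
  | cons b l ih =>
    intro S h
    simp only [addAll, List.foldl_cons]
    by_cases hb : b ∈ S
    · simp only [hb, if_pos]; exact ih S h
    · simp only [hb, if_neg, not_false_iff]
      exact ih _ (by simp [List.nodup_append, h]; exact fun a ha hab => hb (hab ▸ ha))

lemma nodup_closeStep (d : List (Int × List Int)) :
    ∀ (l acc : List Int), acc.Nodup → (l.foldl (fun acc a => addAll acc (nbrs d a)) acc).Nodup := by
  intro l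
  induction l with
  | nil => intro acc h; exact h
  | cons a l ih => intro acc h; exact ih _ (nodup_addAll _ _ h)

lemma mem_closeStep_cases (d : List (Int × List Int)) :
    ∀ (l acc : List Int) (a : Int), a ∈ l.foldl (fun acc c => addAll acc (nbrs d c)) acc →
      a ∈ acc ∨ ∃ b, a ∈ nbrs d b := by
  intro l
  induction l with
  | nil => intro acc a h; exact Or.inl h
  | cons c l ih =>
    intro acc a h
    simp only [List.foldl_cons] at h
    rcases ih _ a h with h' | h'
    · rcases mem_addAll_cases _ _ _ h' with h'' | h''
      · exact Or.inl h''
      · exact Or.inr ⟨c, h''⟩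
    · exact Or.inr h'

lemma nbrs_subset_closeStep (d : List (Int × List Int)) :
    ∀ (l acc : List Int) (a : Int), a ∈ l → nbrs d a ⊆ l.foldl (fun acc c => addAll acc (nbrs d c)) acc := by
  intro l
  induction l with
  | nil => intro acc a h; simp at h
  | cons c l ih =>
    intro acc a h
    simp only [List.foldl_cons]
    rcases List.mem_cons.mp h with rfl | h'
    · intro b hb
      exact (foldl_addAll_prefix (nbrs d) l _).subset (subset_addAll _ _ hb)
    · exact ih _ a h'

lemma reachClos_subset (d : List (Int × List Int)) :
    ∀ (n : Nat) (S : List Int), S ⊆ reachClos d S n := by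
  intro n
  induction n with
  | zero => intro S; simp [reachClos]
  | succ n ih =>
    intro S
    exact fun a ha => ih (closeStep d S) ((closeStep_prefix d S).subset ha)

lemma reachClos_fix (d : List (Int × List Int)) :
    ∀ (n : Nat) (S : List Int), closeStep d S = S → reachClos d S n = S := by
  intro n
  induction n with
  | zero => intro S _; rfl
  | succ n ih => intro S h; simp only [reachClos, h]; exact ih S h

lemma closed_of_fix (d : List (Int × List Int)) (S : List Int) (h : closeStep d S = S) :
    Closed d S := by
  intro a ha
  have := nbrs_subset_closeStep d S S a ha
  rw [show (S.foldl (fun acc c => addAll acc (nbrs d c)) S) = closeStep d S from rfl, h] at this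
  exact this

lemma reachClos_closed (d : List (Int × List Int)) (U : List Int)
    (hU : ∀ a b, b ∈ nbrs d a → b ∈ U) :
    ∀ (n : Nat) (S : List Int), S.Nodup → S ⊆ U → U.length < n + S.length →
      Closed d (reachClos d S n) := by
  intro n
  induction n with
  | zero =>
    intro S hnd hsub hlen
    have := (List.subperm_of_subset hnd hsub).length_le
    omega
  | succ n ih =>
    intro S hnd hsub hlen
    show Closed d (reachClos d (closeStep d S) n)
    by_cases h : closeStep d S = S
    · rw [h, reachClos_fix d n S h]
      exact closed_of_fix d S h
    · have hpre := closeStep_prefix d S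
      have hlt : S.length < (closeStep d S).length := by
        have hle := hpre.length_le
        rcases Nat.lt_or_ge S.length (closeStep d S).length with h' | h'
        · exact h'
        · exact absurd (List.IsPrefix.eq_of_length hpre (by omega)).symm h
      apply ih (closeStep d S) (nodup_closeStep d S S hnd)
      · intro a ha
        rcases mem_closeStep_cases d S S a ha with h' | ⟨b, hb⟩
        · exact hsub h'
        · exact hU b a hb
      · omega

lemma nbrs_subset_flatMap (d : List (Int × List Int)) (a : Int) :
    nbrs d a ⊆ d.flatMap (fun p => p.2) := by
  induction d with
  | nil => simp [nbrs]
  | cons p rest ih =>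
    obtain ⟨k, v⟩ := p
    by_cases hk : k = a
    · simp [nbrs, lookup_eq_alGet, hk]
    · simp only [nbrs, lookup_eq_alGet, alGet?, hk, if_neg, not_false_iff] at *
      intro b hb
      simp only [List.flatMap_cons, List.mem_append]
      exact Or.inr (ih hb)

lemma closed_reachSet (d : List (Int × List Int)) (x : Int) : Closed d (reachSet d x) := by
  apply reachClos_closed d (x :: d.flatMap (fun p => p.2))
  · intro a b hb
    exact List.mem_cons_of_mem _ (nbrs_subset_flatMap d a hb)
  · simp
  · intro a ha
    simp at ha
    simp [ha]
  · simp

lemma closed_reachPlus (d : List (Int × List Int)) (k : Int) : Closed d (reachPlus d k) := by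
  apply reachClos_closed d (d.flatMap (fun p => p.2))
  · intro a b hb
    exact nbrs_subset_flatMap d a hb
  · exact nodup_addAll _ _ (List.nodup_nil)
  · intro a ha
    rcases mem_addAll_cases _ _ _ ha with h | h
    · simp at h
    · exact nbrs_subset_flatMap d k h
  · omega

lemma mem_reachSet_self (d : List (Int × List Int)) (x : Int) : x ∈ reachSet d x :=
  reachClos_subset d _ [x] (by simp)

lemma nbrs_subset_reachPlus (d : List (Int × List Int)) (k : Int) :
    nbrs d k ⊆ reachPlus d k :=
  fun b hb => reachClos_subset d _ _ (subset_addAll _ _ hb)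

lemma reach_closed {d : List (Int × List Int)} {T : List Int} {a b : Int}
    (hT : Closed d T) (ha : a ∈ T) (h : Reach d a b) : b ∈ T := by
  induction h with
  | refl => exact ha
  | tail _ e ih => exact hT _ ih e

lemma alGet?_some_mem_keys {d : List (Int × List Int)} {a : Int} {l : List Int}
    (h : alGet? d a = some l) : a ∈ d.map Prod.fst := by
  induction d with
  | nil => simp [alGet?] at h
  | cons p rest ih =>
    obtain ⟨k, v⟩ := p
    by_cases hk : k = a
    · simp [hk]
    · simp only [alGet?, hk, if_neg, not_false_iff] at h
      exact List.mem_cons_of_mem _ (ih h)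

-- 'ok d fuel x': the recursion of A from x terminates within depth fuel.
def trova_v_ok (d : List (Int × List Int)) : Nat → Int → Prop
  | 0, _ => False
  | fuel + 1, x => ∀ l, alGet? d x = some l → ∀ z ∈ l, trova_v_ok d fuel z

-- Termination of A's recursion: under Pre_, along any DFS path from x the visited keys
-- are pairwise distinct (else a key on a cycle would be reachable from x), so the
-- recursion depth is bounded by d.length + 1.
lemma term_aux (d : List (Int × List Int)) (x : Int)
    (hpre : ∀ k ∈ reachSet d x, k ∉ reachPlus d k) :
    ∀ (m : Nat) (a : Int) (V : List Int), V.Nodup → (∀ v ∈ V, v ∈ d.map Prod.fst) →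
      a ∉ V → (∀ v ∈ V, Reach d x v) → (∀ v ∈ V, Reach d v a) → Reach d x a →
      d.length ≤ m + V.length → trova_v_ok d (m + 1) a := by
  intro m
  induction m with
  | zero =>
    intro a V hnd hkeys haV _ _ _ hlen
    intro l hl z hz
    exfalso
    have hak : a ∈ d.map Prod.fst := alGet?_some_mem_keys hl
    have hnd' : (a :: V).Nodup := List.nodup_cons.mpr ⟨haV, hnd⟩
    have hsub : (a :: V) ⊆ d.map Prod.fst := by
      intro v hv
      rcases List.mem_cons.mp hv with rfl | hv'
      · exact hak
      · exact hkeys v hv'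
    have := (List.subperm_of_subset hnd' hsub).length_le
    simp at this
    omega
  | succ m ih =>
    intro a V hnd hkeys haV hxV hVa hxa hlen
    intro l hl z hz
    have hedge : Edge d a z := by
      show z ∈ nbrs d a
      simp [nbrs, lookup_eq_alGet, hl, hz]
    by_cases hzin : z = a ∨ z ∈ V
    · exfalso
      have hza : Reach d z a := by
        rcases hzin with rfl | hzV
        · exact Relation.ReflTransGen.refl
        · exact hVa z hzV
      have hxz : Reach d x z := hxa.tail hedge
      have hplus : z ∈ reachPlus d z := by
        rcases Relation.ReflTransGen.cases_head hza with heq | ⟨w, hw, hwa⟩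
        · exact reach_closed (closed_reachPlus d z)
            (nbrs_subset_reachPlus d z (heq ▸ hedge)) Relation.ReflTransGen.refl
        · exact reach_closed (closed_reachPlus d z)
            (nbrs_subset_reachPlus d z hw) (hwa.tail hedge)
      exact hpre z (reach_closed (closed_reachSet d x) (mem_reachSet_self d x) hxz) hplus
    · rw [not_or] at hzin
      apply ih z (a :: V)
      · exact List.nodup_cons.mpr ⟨haV, hnd⟩
      · intro v hv
        rcases List.mem_cons.mp hv with rfl | hv'
        · exact alGet?_some_mem_keys hl
        · exact hkeys v hv'
      · simp [hzin.1, hzin.2]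
      · intro v hv
        rcases List.mem_cons.mp hv with rfl | hv'
        · exact hxa
        · exact hxV v hv'
      · intro v hv
        rcases List.mem_cons.mp hv with rfl | hv'
        · exact Relation.ReflTransGen.single hedge
        · exact (hVa v hv').tail hedge
      · exact hxa.tail hedge
      · simp; omega

lemma pre_ok (d : List (Int × List Int)) (x : Int)
    (hpre : ∀ k ∈ reachSet d x, k ∉ reachPlus d k) : trova_v_ok d (d.length + 1) x := by
  apply term_aux d x hpre d.length x []
  · exact List.nodup_nil
  · simp
  · simp
  · simp
  · simp
  · exact Relation.ReflTransGen.refl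
  · simp

-- Main simulation lemma: one full recursive call of A consumes exactly
-- 'trova_v_steps' iterations of B's stack loop.
lemma loop_sim (d : List (Int × List Int)) :
    ∀ fa x diz rest k, trova_v_ok d fa x →
      trova_v_loop d (trova_v_steps d fa x + k) diz (x :: rest)
        = trova_v_loop d k (trova_v_go d fa diz x) rest := by
  intro fa
  induction fa with
  | zero => intro x diz rest k h; exact absurd h (by simp [trova_v_ok])
  | succ f ih =>
    intro x diz rest k h
    cases hg : alGet? d x with
    | none =>
      have h1 : trova_v_steps d (f + 1) x = 1 := by simp [trova_v_steps, hg]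
      rw [h1]
      have : 1 + k = k + 1 := by omega
      rw [this]
      simp [trova_v_loop, trova_v_go, hg]
    | some l =>
      have hz : ∀ z ∈ l, trova_v_ok d f z := h l hg
      have inner : ∀ (l' : List Int), (∀ z ∈ l', trova_v_ok d f z) →
          ∀ diz' rest k, trova_v_loop d ((l'.map (fun z => trova_v_steps d f z)).sum + k) diz' (l' ++ rest)
            = trova_v_loop d k (l'.foldl (fun acc z => trova_v_go d f acc z) diz') rest := by
        intro l'
        induction l' with
        | nil => intro _ diz' rest k; simp
        | cons a t iht =>
          intro hall diz' rest k
          have : ((a :: t).map (fun z => trova_v_steps d f z)).sum + k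
              = trova_v_steps d f a + ((t.map (fun z => trova_v_steps d f z)).sum + k) := by
            simp; omega
          rw [this, List.cons_append, ih a diz' (t ++ rest) _ (hall a (by simp))]
          exact iht (fun z hzt => hall z (by simp [hzt])) _ rest k
      have hsteps : trova_v_steps d (f + 1) x = 1 + (l.map (fun z => trova_v_steps d f z)).sum := by
        simp [trova_v_steps, hg]
      rw [hsteps]
      have : 1 + (l.map (fun z => trova_v_steps d f z)).sum + k
          = ((l.map (fun z => trova_v_steps d f z)).sum + k) + 1 := by omega
      rw [this]
      show trova_v_loop d (_ + 1) diz (x :: rest) = _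
      simp only [trova_v_loop, hg]
      rw [inner l hz (alSet diz x l) rest k]
      simp [trova_v_go, hg]

-- ===== VERDICT (by name: the statement is the Claim_ definition above) =====
theorem trova_v_spec : Claim_equal_trova_v := by
  intro d diz x _ hpre
  unfold Spec_trova_v trova_v trova_v_alt
  have hok : trova_v_ok d (d.length + 1) x := pre_ok d x hpre
  have := loop_sim d (d.length + 1) x diz [] 0 hok
  rw [Nat.add_zero] at this
  rw [this]
  cases h : trova_v_go d (d.length + 1) diz x <;> simp [trova_v_loop]
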